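-- pv_equiv track=rewrite | github.com/AdamSteinberg1/CSC330_Flesch | python/flesch.py | countSyllablesRecursive
-- ===== SOURCE A (Python) =====
-- def countSyllablesRecursive(word):
--     if len(word) == 0: #empty string base case
--         return 0
--
--     vowels = ['a', 'e', 'i', 'o', 'u', 'y']
--
--     if word[0].lower() in vowels:
--
--         if len(word) == 1: #if the word is only 1 character, then it is only 1 syllable
--             if word == 'e': #unless it is e, this avoids counting e's at the end of words
--                 return 0
--             else:
--                 return 1
--
--
--         firstConsonant = 1 #the index of the first consonant
--
--         while word[firstConsonant].lower() in vowels: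
--             if firstConsonant == len(word)-1: #if we've reached the end of the word, i.e. there were no consonants
--                 return 1
--             else:
--                 firstConsonant += 1
--
--         return 1 + countSyllablesRecursive(word[firstConsonant:])
--
--     else:
--         return countSyllablesRecursive(word[1:]) #count the syllables in all the characters except the first
-- ===== SOURCE B (Python) =====
-- def countSyllablesRecursive(word):
--     vowels = set('aeiouy')
--     count = 0
--     prev = False
--     for c in word:
--         v = c.lower() in vowels
--         if v and not prev:
--             count += 1
--         prev = v
--     if word.endswith('e') and (len(word) == 1 or word[-2].lower() not in vowels):
--         count -= 1
--     return count
-- ===== Notes on version B (the rewrite author's own statement) =====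
-- stated objective: faster
-- what changed: A recursively re-slices the word suffix by suffix (quadratic copying plus deep recursion); B makes one linear pass counting maximal vowel runs and then subtracts 1 iff the word ends in a lowercase letter e that forms its own vowel run (word length 1 or a non-vowel before it), which is exactly A's rule of not counting a final lone e.
import Mathlib
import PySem

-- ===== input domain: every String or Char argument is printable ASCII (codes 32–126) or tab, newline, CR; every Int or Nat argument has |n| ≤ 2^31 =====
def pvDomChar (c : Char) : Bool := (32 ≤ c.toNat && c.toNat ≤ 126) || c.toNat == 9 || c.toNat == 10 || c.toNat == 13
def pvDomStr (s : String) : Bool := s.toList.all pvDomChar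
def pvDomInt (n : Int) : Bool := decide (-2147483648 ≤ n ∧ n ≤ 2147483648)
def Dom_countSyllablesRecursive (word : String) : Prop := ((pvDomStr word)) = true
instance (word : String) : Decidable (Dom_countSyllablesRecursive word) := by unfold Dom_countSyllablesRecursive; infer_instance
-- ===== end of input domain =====

-- B replaces A's recursive suffix-slicing scan by one linear pass counting vowel runs,
-- with A's lone-trailing-e rule expressed as a final adjustment (objective: faster).

-- ===== PORT A =====
-- word[i].lower() in vowels
def pvIsVowelA (c : Char) : Bool := PySem.Chars.lowerChar c ∈ (['a', 'e', 'i', 'o', 'u', 'y'] : List Char)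

-- A's while loop: starting at index 1, advance while vowels; `none` means the loop
-- hit the end of the word ("return 1"), `some s` is word[firstConsonant:].
def csrLoopA : List Char → Option (List Char)
  | [] => none
  | c :: cs => if pvIsVowelA c then (if cs = [] then none else csrLoopA cs) else some (c :: cs)

lemma csrLoopA_length : ∀ (cs s : List Char), csrLoopA cs = some s → s.length ≤ cs.length := by
  intro cs
  induction cs with
  | nil => intro s h; simp [csrLoopA] at h
  | cons c cs ih =>
    intro s h
    simp only [csrLoopA] at h
    split at h
    · split at h
      · exact absurd h (by simp)
      · exact le_trans (ih s h) (by simp)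
    · cases h; exact le_refl _

def csrA : List Char → Int
  | [] => 0
  | c :: rest =>
    if pvIsVowelA c then
      if rest = [] then (if c = 'e' then 0 else 1)
      else
        match h : csrLoopA rest with
        | none => 1
        | some s => 1 + csrA s
    else csrA rest
termination_by l => l.length
decreasing_by
  · exact Nat.lt_succ_of_le (csrLoopA_length _ _ h)
  · simp

def countSyllablesRecursive (word : String) : Int := csrA word.toList

-- ===== PORT B =====
-- vowels = set('aeiouy')
def pvVowelsB : List Char := PySem.Set.ofList ['a', 'e', 'i', 'o', 'u', 'y']
def pvIsVowelB (c : Char) : Bool := PySem.Chars.lowerChar c ∈ pvVowelsB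

-- the for loop: state (prev, count)
def csrLoopB : List Char → Bool → Int → Int
  | [], _, count => count
  | c :: cs, prev, count =>
    let v := pvIsVowelB c
    csrLoopB cs v (if v && !prev then count + 1 else count)

def countSyllablesRecursive_alt (word : String) : Int :=
  let l := word.toList
  let count := csrLoopB l false 0
  if PySem.Chars.endswith l ['e'] &&
      (l.length == 1 || !pvIsVowelB (PySem.List.pyGetD l (-2) ' ')) then
    count - 1
  else count

-- ===== PRECONDITION & SPEC =====
def Spec_countSyllablesRecursive (word : String) (out : Int) : Prop := out = countSyllablesRecursive_alt word
instance (word : String) (out : Int) : Decidable (Spec_countSyllablesRecursive word out) := by unfold Spec_countSyllablesRecursive; infer_instance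

-- ===== CLAIM (what is proved, stated in full; the proofs are below) =====
def Claim_equal_countSyllablesRecursive : Prop := ∀ (word : String), Dom_countSyllablesRecursive word → Spec_countSyllablesRecursive word (countSyllablesRecursive word)

-- ===== LEMMAS AND PROOFS =====

lemma vowel_eq (c : Char) : pvIsVowelA c = pvIsVowelB c := by
  have h : pvVowelsB = ['a', 'e', 'i', 'o', 'u', 'y'] := by decide
  simp [pvIsVowelA, pvIsVowelB, h]

-- proof-side recursive form of B's trailing-'e' adjustment
def adjI : List Char → Int
  | [] => 0
  | [c] => if c = 'e' then 1 else 0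
  | [a, b] => if b = 'e' ∧ pvIsVowelB a = false then 1 else 0
  | _ :: b :: c :: t => adjI (b :: c :: t)

-- the adjustment condition in B's port
def condB (l : List Char) : Bool :=
  PySem.Chars.endswith l ['e'] && (l.length == 1 || !pvIsVowelB (PySem.List.pyGetD l (-2) ' '))

lemma adj_eq : ∀ l : List Char, (if condB l then (1 : Int) else 0) = adjI l := by
  intro l
  induction l with
  | nil => decide
  | cons a t ih =>
    match t with
    | [] =>
        by_cases hc : a = 'e'
        · subst hc; decide
        · rw [if_neg (by simp [condB, PySem.Chars.endswith_iff, List.suffix_cons_iff]; exact fun h => hc h.symm)]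
          simp [adjI, hc]
    | [b] =>
        have hg : PySem.List.pyGetD [a, b] (-2) ' ' = a := by
          rw [PySem.List.pyGetD_neg_ofNat [a, b] 2 ' ' (by omega) (by simp)]
          rfl
        have hcond : condB [a, b] = ((b == 'e') && !pvIsVowelB a) := by
          simp only [condB, hg]
          have h1 : (([a, b].length : Nat) == 1) = false := by simp
          rw [h1, Bool.false_or]
          congr 1
          by_cases hb : b = 'e'
          · subst hb; simp [PySem.Chars.endswith_iff]
          · have h2 : (b == 'e') = false := by simp [hb]
            rw [h2, ← Bool.not_eq_true]
            simp [PySem.Chars.endswith_iff, List.suffix_cons_iff]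
            exact fun h => hb h.symm
        rw [hcond]
        by_cases hb : b = 'e' <;> by_cases hv : pvIsVowelB a = true <;>
          simp [adjI, hb, hv]
    | b :: c :: u =>
        have h1 : condB (a :: b :: c :: u) = condB (b :: c :: u) := by
          have he : PySem.Chars.endswith (a :: b :: c :: u) ['e'] =
              PySem.Chars.endswith (b :: c :: u) ['e'] := by
            rw [Bool.eq_iff_iff]
            simp only [PySem.Chars.endswith_iff]
            rw [List.suffix_cons_iff]
            simp
          have hg : PySem.List.pyGetD (a :: b :: c :: u) (-2) ' ' =
              PySem.List.pyGetD (b :: c :: u) (-2) ' ' := by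
            rw [PySem.List.pyGetD_neg_ofNat (a :: b :: c :: u) 2 ' ' (by omega) (by simp),
                PySem.List.pyGetD_neg_ofNat (b :: c :: u) 2 ' ' (by omega) (by simp)]
            have h : (a :: b :: c :: u).length - 2 = ((b :: c :: u).length - 2) + 1 := by simp
            simp only [h, List.getElem_cons_succ]
          simp only [condB, he, hg, List.length_cons]
          have h2 : (u.length + 1 + 1 + 1 == 1) = false := by simp
          have h3 : (u.length + 1 + 1 == 1) = false := by simp
          rw [h2, h3]
        rw [h1, ih]
        rfl

lemma csrLoopB_acc : ∀ (l : List Char) (p : Bool) (k : Int), csrLoopB l p k = k + csrLoopB l p 0 := by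
  intro l
  induction l with
  | nil => intro p k; simp [csrLoopB]
  | cons c cs ih =>
    intro p k
    simp only [csrLoopB]
    rw [ih, ih (pvIsVowelB c) (if (pvIsVowelB c && !p) = true then 0 + 1 else 0)]
    split <;> ring

lemma csrLoopB_all_vowels_true : ∀ l : List Char, (∀ x ∈ l, pvIsVowelB x = true) → csrLoopB l true 0 = 0 := by
  intro l
  induction l with
  | nil => intro _; rfl
  | cons c cs ih =>
    intro h
    have hc : pvIsVowelB c = true := h c (by simp)
    simp [csrLoopB, hc, ih (fun x hx => h x (by simp [hx]))]

lemma csrLoopB_vowel_prefix : ∀ (p s : List Char), (∀ x ∈ p, pvIsVowelB x = true) → csrLoopB (p ++ s) true 0 = csrLoopB s true 0 := by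
  intro p
  induction p with
  | nil => intro s _; rfl
  | cons c cs ih =>
    intro s h
    have hc : pvIsVowelB c = true := h c (by simp)
    simp [csrLoopB, hc, ih s (fun x hx => h x (by simp [hx]))]

lemma csrLoopB_cons_nonvowel (c : Char) (l : List Char) (p : Bool) (hc : pvIsVowelB c = false) :
    csrLoopB (c :: l) p 0 = csrLoopB l false 0 := by
  simp [csrLoopB, hc]

lemma csrLoopA_none : ∀ cs : List Char, csrLoopA cs = none → ∀ x ∈ cs, pvIsVowelA x = true := by
  intro cs
  induction cs with
  | nil => intro _ x hx; simp at hx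
  | cons c cs ih =>
    intro h x hx
    simp only [csrLoopA] at h
    split at h
    · rcases List.mem_cons.mp hx with rfl | hx'
      · assumption
      · split at h
        · simp_all
        · exact ih h x hx'
    · simp at h

lemma csrLoopA_some : ∀ (cs s : List Char), csrLoopA cs = some s →
    ∃ p, cs = p ++ s ∧ (∀ x ∈ p, pvIsVowelA x = true) ∧ ∃ h t, s = h :: t ∧ pvIsVowelA h = false := by
  intro cs
  induction cs with
  | nil => intro s h; simp [csrLoopA] at h
  | cons c cs ih =>
    intro s h
    simp only [csrLoopA] at h
    split at h
    · split at h
      · simp at h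
      · obtain ⟨p, hp, hv, hs⟩ := ih s h
        exact ⟨c :: p, by simp [hp], by intro x hx; rcases List.mem_cons.mp hx with rfl | hx' <;> simp_all, hs⟩
    · cases h
      exact ⟨[], rfl, by simp, c, cs, rfl, by simp_all⟩

lemma adjI_cons_of_two_le : ∀ (x : Char) (s : List Char), 2 ≤ s.length → adjI (x :: s) = adjI s := by
  intro x s h
  match s with
  | [] => simp at h
  | [a] => simp at h
  | a :: b :: t => rfl

lemma adjI_append_of_two_le : ∀ (p s : List Char), 2 ≤ s.length → adjI (p ++ s) = adjI s := by
  intro p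
  induction p with
  | nil => intro s _; rfl
  | cons c cs ih =>
    intro s h
    rw [List.cons_append, adjI_cons_of_two_le c (cs ++ s) (le_trans h (by simp)), ih s h]

lemma adjI_last_ne : ∀ (l : List Char) (z : Char), l.getLast? = some z → z ≠ 'e' → adjI l = 0 := by
  intro l
  induction l with
  | nil => intro z h; simp at h
  | cons c cs ih =>
    intro z h hz
    match cs, h with
    | [], h => simp at h; subst h; simp [adjI, hz]
    | [a], h =>
        simp [List.getLast?] at h; subst h
        simp [adjI, hz]
    | a :: b :: t, h =>
        have h' : (a :: b :: t).getLast? = some z := by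
          rw [List.getLast?_cons_cons] at h; exact h
        rw [adjI_cons_of_two_le c _ (by simp), ih z h' hz]
  
lemma adjI_all_vowels : ∀ l : List Char, 2 ≤ l.length → (∀ x ∈ l, pvIsVowelB x = true) → adjI l = 0 := by
  intro l
  induction l with
  | nil => intro h; simp at h
  | cons c cs ih =>
    intro _ h
    match cs with
    | [] => simp at *
    | [a] =>
        have ha : pvIsVowelB c = true := h c (by simp)
        simp [adjI, ha]
    | a :: b :: t =>
        rw [adjI_cons_of_two_le c _ (by simp)]
        exact ih (by simp) (fun x hx => h x (by simp [hx]))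

lemma key : ∀ (n : Nat) (l : List Char), l.length ≤ n → csrA l = csrLoopB l false 0 - adjI l := by
  intro n
  induction n with
  | zero =>
    intro l hl
    have : l = [] := List.eq_nil_of_length_eq_zero (Nat.le_zero.mp hl)
    subst this; simp [csrA, csrLoopB, adjI]
  | succ n ihn =>
    intro l hl
    match l with
    | [] => simp [csrA, csrLoopB, adjI]
    | c :: rest =>
      have hl' : rest.length ≤ n := by simp at hl; omega
      by_cases hv : pvIsVowelA c = true
      · -- head is a vowel
        have hvB : pvIsVowelB c = true := vowel_eq c ▸ hv
        by_cases hr : rest = []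
        · subst hr
          simp only [csrA, hv, if_true]
          simp [csrLoopB, hvB, adjI]
          by_cases hc : c = 'e' <;> simp [hc]
        · have hstep : csrLoopB (c :: rest) false 0 = 1 + csrLoopB rest true 0 := by
            simp only [csrLoopB, hvB]
            rw [csrLoopB_acc]
            simp
          cases hs : csrLoopA rest with
          | none =>
            have hall : ∀ x ∈ rest, pvIsVowelB x = true := fun x hx =>
              vowel_eq x ▸ csrLoopA_none rest hs x hx
            have : csrA (c :: rest) = 1 := by
              simp only [csrA, hv, if_true, if_neg hr]
              split
              · rfl
              · simp_all
            rw [this, hstep, csrLoopB_all_vowels_true rest hall]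
            have hadj : adjI (c :: rest) = 0 := by
              apply adjI_all_vowels
              · cases rest with
                | nil => exact absurd rfl hr
                | cons b t => simp
              · intro x hx
                rcases List.mem_cons.mp hx with rfl | hx'
                · exact hvB
                · exact hall x hx'
            rw [hadj]; ring
          | some s =>
            obtain ⟨p, hp, hpall, h, t, hst, hhc⟩ := csrLoopA_some rest s hs
            have hslen : s.length ≤ n := le_trans (csrLoopA_length rest s hs) hl'
            have ihs := ihn s hslen
            have hA : csrA (c :: rest) = 1 + csrA s := by
              simp only [csrA, hv, if_true, if_neg hr]
              split <;> simp_all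
            have hhB : pvIsVowelB h = false := vowel_eq h ▸ hhc
            have hpallB : ∀ x ∈ p, pvIsVowelB x = true := fun x hx => vowel_eq x ▸ hpall x hx
            have hcount : csrLoopB (c :: rest) false 0 = 1 + csrLoopB s false 0 := by
              rw [hstep, hp, hst, csrLoopB_vowel_prefix p _ hpallB,
                  csrLoopB_cons_nonvowel h t true hhB, ← csrLoopB_cons_nonvowel h t false hhB]
            have hadj : adjI (c :: rest) = adjI s := by
              cases t with
              | nil =>
                have hne : h ≠ 'e' := by
                  intro hh; subst hh; exact absurd (by decide : pvIsVowelA 'e' = true) (by simp [hhc])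
                have h1 : adjI s = 0 := by subst hst; simp [adjI, hne]
                have h2 : adjI (c :: rest) = 0 := by
                  apply adjI_last_ne _ h _ hne
                  rw [hp, hst, show c :: (p ++ [h]) = (c :: p) ++ [h] by simp,
                      List.getLast?_concat]
                rw [h1, h2]
              | cons t0 ts =>
                rw [hp, hst, show c :: (p ++ h :: t0 :: ts) = (c :: p) ++ (h :: t0 :: ts) by simp,
                    adjI_append_of_two_le (c :: p) _ (by simp)]
            rw [hA, ihs, hcount, hadj]; ring
      · -- head is not a vowel
        have hvB : pvIsVowelB c = false := by
          rw [← vowel_eq]; exact Bool.eq_false_iff.mpr hv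
        have hA : csrA (c :: rest) = csrA rest := by simp [csrA, hv]
        have hcne : c ≠ 'e' := by
          intro hh; subst hh; exact hv (by decide)
        have hadj : adjI (c :: rest) = adjI rest := by
          match rest with
          | [] => simp [adjI, hcne]
          | [b] => simp [adjI, hvB]
          | b :: d :: u => rfl
        rw [hA, csrLoopB_cons_nonvowel c rest false hvB, hadj, ihn rest hl']

theorem countSyllablesRecursive_spec : Claim_equal_countSyllablesRecursive := by
  intro word _
  unfold Spec_countSyllablesRecursive countSyllablesRecursive countSyllablesRecursive_alt
  rw [key word.toList.length word.toList (le_refl _)]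
  show _ = (if condB word.toList then csrLoopB word.toList false 0 - 1 else csrLoopB word.toList false 0)
  rw [← adj_eq word.toList]
  split <;> ring
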